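-- pv_equiv track=rewrite | github.com/limix/limix | limix/io/_detect.py | _split_fetch_spec
-- ===== SOURCE A (Python) =====
-- def _split_fetch_spec(txt):
--     parts = []
--     j = 0
--     for i in range(len(txt)):
--         if len(parts) == 2:
--             parts.append(txt[i:])
--         if txt[i] == ":":
--             if j == i:
--                 raise ValueError("Invalid fetch specification syntax.")
--             parts.append(txt[j:i])
--             j = i + 1
--
--     if len(txt[j:]) > 0:
--         parts.append(txt[j:])
--
--     if len(parts) == 0:
--         raise ValueError("Invalid fetch specification syntax.")
--
--     data = {"filepath": "", "filetype": "", "matrix_spec": ""}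
--     data["filepath"] = parts[0]
--     if len(parts) > 1:
--         data["filetype"] = parts[1]
--     if len(parts) > 2:
--         data["matrix_spec"] = parts[2]
--     return data
-- ===== SOURCE B (Python) =====
-- def _split_fetch_spec(txt):
--     pieces = txt.split(":")
--     if txt == "" or "" in pieces[:-1]:
--         raise ValueError("Invalid fetch specification syntax.")
--     return {
--         "filepath": pieces[0],
--         "filetype": pieces[1] if len(pieces) > 1 else "",
--         "matrix_spec": ":".join(pieces[2:]) if len(pieces) > 2 else "",
--     }
-- ===== Notes on version B (the rewrite author's own statement) =====
-- stated objective: simpler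
-- what changed: A's character-index scan that grows a parts list (with a special re-append branch once two pieces exist) is replaced by one str.split, a validation pass over the pieces, and a join of the tail pieces for matrix_spec.
import Mathlib
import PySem

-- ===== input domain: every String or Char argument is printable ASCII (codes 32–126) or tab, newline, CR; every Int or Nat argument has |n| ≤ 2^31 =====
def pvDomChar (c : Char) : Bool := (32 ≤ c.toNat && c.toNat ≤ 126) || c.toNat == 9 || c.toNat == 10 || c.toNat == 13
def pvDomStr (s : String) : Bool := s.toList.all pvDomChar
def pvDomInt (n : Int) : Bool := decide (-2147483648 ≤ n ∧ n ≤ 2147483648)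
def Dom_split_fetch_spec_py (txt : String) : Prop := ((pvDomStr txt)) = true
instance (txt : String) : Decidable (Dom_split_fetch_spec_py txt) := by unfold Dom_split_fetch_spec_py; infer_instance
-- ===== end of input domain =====

-- B replaces A's character-index scan (growing `parts` with slices) by split-on-':' /
-- validate / join over the pieces; objective: simpler, same exact values and same raises.

-- ===== PORT A =====
-- the `for i in range(len(txt))` loop of A, state (parts, j); none = ValueError
def pvLoopA (l : List Char) (n i : Nat) (parts : List (List Char)) (j : Nat) :
    Option (List (List Char) × Nat) :=
  if h : i < n then
    let parts' := if parts.length = 2 then parts ++ [PySem.List.slice l (some (i : Int)) none] else parts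
    if PySem.List.pyGet? l (i : Int) = some ':' then
      if j = i then none
      else pvLoopA l n (i + 1) (parts' ++ [PySem.List.slice l (some (j : Int)) (some (i : Int))]) (i + 1)
    else pvLoopA l n (i + 1) parts' j
  else some (parts, j)
termination_by n - i

def split_fetch_spec_py (txt : String) : List (String × String) :=
  match pvLoopA txt.toList txt.toList.length 0 [] 0 with
  | none => []  -- raise ValueError
  | some (parts, j) =>
    let tl := PySem.List.slice txt.toList (some (j : Int)) none
    let parts' := if 0 < tl.length then parts ++ [tl] else parts
    if parts'.length = 0 then []  -- raise ValueError
    else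
      [("filepath", String.ofList (parts'.getD 0 [])),
       ("filetype", String.ofList (if 1 < parts'.length then parts'.getD 1 [] else [])),
       ("matrix_spec", String.ofList (if 2 < parts'.length then parts'.getD 2 [] else []))]

-- ===== PORT B =====
def split_fetch_spec_py_alt (txt : String) : List (String × String) :=
  let l := txt.toList
  let pieces := l.splitOn ':'
  if l = [] ∨ [] ∈ pieces.dropLast then []  -- raise ValueError
  else
    [("filepath", String.ofList (pieces.getD 0 [])),
     ("filetype", if 1 < pieces.length then String.ofList (pieces.getD 1 []) else ""),
     ("matrix_spec", if 2 < pieces.length then String.ofList (([':'] : List Char).intercalate (pieces.drop 2)) else "")]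

-- ===== PRECONDITION & SPEC =====
-- no two consecutive colons anywhere in the list
def pvNoColonPair : List Char → Bool
  | c :: d :: r => !(c == ':' && d == ':') && pvNoColonPair (d :: r)
  | _ => true

-- Pre_ excludes exactly the inputs where A raises ValueError (empty string, leading
-- colon, or two consecutive colons); B raises ValueError on exactly the same inputs.
def Pre_split_fetch_spec_py (txt : String) : Prop :=
  txt.toList ≠ [] ∧ txt.toList.head? ≠ some ':' ∧ pvNoColonPair txt.toList = true
instance (txt : String) : Decidable (Pre_split_fetch_spec_py txt) := by
  unfold Pre_split_fetch_spec_py; infer_instance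

def pvWitness_split_fetch_spec_py : String := "a:b:c"

def Spec_split_fetch_spec_py (txt : String) (out : List (String × String)) : Prop :=
  out = split_fetch_spec_py_alt txt
instance (txt : String) (out : List (String × String)) : Decidable (Spec_split_fetch_spec_py txt out) := by
  unfold Spec_split_fetch_spec_py; infer_instance

-- ===== CLAIM (what is proved, stated in full; the proofs are below) =====
def Claim_equal_split_fetch_spec_py : Prop := ∀ (txt : String), Dom_split_fetch_spec_py txt → Pre_split_fetch_spec_py txt → Spec_split_fetch_spec_py txt (split_fetch_spec_py txt)

-- ===== LEMMAS AND PROOFS =====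

-- A's loop, rewritten on the remaining suffix: seg is the current segment txt[j:i]
def loopR : List Char → List (List Char) → List Char → Option (List (List Char) × List Char)
  | [], parts, seg => some (parts, seg)
  | c :: r, parts, seg =>
    let parts' := if parts.length = 2 then parts ++ [c :: r] else parts
    if c = ':' then (if seg = [] then none else loopR r (parts' ++ [seg]) [])
    else loopR r parts' (seg ++ [c])

-- A's post-loop tail and dict construction, on loopR's result
def pvFin : Option (List (List Char) × List Char) → List (String × String)
  | none => []
  | some (parts, tl) =>
    let parts' := if 0 < tl.length then parts ++ [tl] else parts
    if parts'.length = 0 then []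
    else
      [("filepath", String.ofList (parts'.getD 0 [])),
       ("filetype", String.ofList (if 1 < parts'.length then parts'.getD 1 [] else [])),
       ("matrix_spec", String.ofList (if 2 < parts'.length then parts'.getD 2 [] else []))]

theorem pvBridge (l : List Char) : ∀ (k i j : Nat) (parts : List (List Char)),
    i + k = l.length → j ≤ i →
    (pvLoopA l l.length i parts j).map (fun pj => (pj.1, l.drop pj.2)) =
      loopR (l.drop i) parts ((l.drop j).take (i - j)) := by
  intro k
  induction k with
  | zero =>
    intro i j parts hk hj
    have hi : i = l.length := by omega
    rw [pvLoopA, dif_neg (by omega : ¬ i < l.length)]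
    subst hi
    have hseg : (l.drop j).take (l.length - j) = l.drop j :=
      List.take_of_length_le (by simp)
    simp [hseg, loopR]
  | succ k ih =>
    intro i j parts hk hj
    have hi : i < l.length := by omega
    rw [pvLoopA, dif_pos hi]
    rw [List.drop_eq_getElem_cons hi]
    have hget : PySem.List.pyGet? l (i : Int) = some l[i] := by
      rw [PySem.List.pyGet?_natCast, List.getElem?_eq_getElem hi]
    have hslice : PySem.List.slice l (some (i : Int)) none = l[i] :: l.drop (i + 1) := by
      rw [PySem.List.slice_from_natCast, List.drop_eq_getElem_cons hi]
    simp only [loopR, hget, hslice, Option.some.injEq]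
    by_cases hcol : l[i] = ':'
    · rw [if_pos hcol, if_pos hcol]
      by_cases hji : j = i
      · subst hji
        simp [Option.map]
      · have hjlt : j < i := by omega
        have hsegne : (l.drop j).take (i - j) ≠ [] := by
          apply List.ne_nil_of_length_pos
          rw [List.length_take, List.length_drop]
          have h6 : 0 < i - j := by omega
          have h7 : 0 < l.length - j := by omega
          omega
        rw [if_neg hji, if_neg hsegne]
        have hsl : PySem.List.slice l (some (j : Int)) (some (i : Int)) = (l.drop j).take (i - j) :=
          PySem.List.slice_natCast l j i
        have h5 := ih (i + 1) (i + 1) ((if parts.length = 2 then parts ++ [l[i] :: l.drop (i + 1)] else parts) ++ [PySem.List.slice l (some (j : Int)) (some (i : Int))]) (by omega) (le_refl _)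
        rw [Nat.sub_self, List.take_zero] at h5
        rw [h5, hsl]
    · rw [if_neg hcol, if_neg hcol]
      have hseg : (l.drop j).take (i + 1 - j) = (l.drop j).take (i - j) ++ [l[i]] := by
        have h1 : i + 1 - j = (i - j) + 1 := by omega
        have h4 : (l.drop j)[i - j]? = some l[i] := by
          rw [List.getElem?_drop]
          have h5' : j + (i - j) = i := by omega
          rw [h5', List.getElem?_eq_getElem hi]
        rw [h1, List.take_add_one, h4]
        rfl
      have := ih (i + 1) j (if parts.length = 2 then parts ++ [l[i] :: l.drop (i + 1)] else parts) (by omega) (by omega)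
      rw [this, hseg]

theorem pvA_eq (txt : String) : split_fetch_spec_py txt = pvFin (loopR txt.toList [] []) := by
  have hb := pvBridge txt.toList txt.toList.length 0 0 [] (by omega) (le_refl 0)
  simp only [List.drop_zero, Nat.sub_self, List.take_zero] at hb
  unfold split_fetch_spec_py
  cases h : pvLoopA txt.toList txt.toList.length 0 [] 0 with
  | none =>
    rw [h] at hb
    simp only [Option.map_none] at hb
    rw [← hb]
    rfl
  | some pj =>
    obtain ⟨parts, j⟩ := pj
    rw [h] at hb
    simp only [Option.map_some] at hb
    rw [← hb]
    simp [pvFin, PySem.List.slice_from_natCast]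

theorem pvNpc_tail (c : Char) (r : List Char) (h : pvNoColonPair (c :: r) = true) :
    pvNoColonPair r = true := by
  cases r with
  | nil => rfl
  | cons d s =>
    simp only [pvNoColonPair, Bool.and_eq_true] at h
    exact h.2

theorem pvNpc_head (r : List Char) (h : pvNoColonPair (':' :: r) = true) :
    r.head? ≠ some ':' := by
  cases r with
  | nil => simp
  | cons d s =>
    simp only [pvNoColonPair, Bool.and_eq_true, Bool.not_eq_eq_eq_not, Bool.not_true,
      Bool.and_eq_false_iff] at h
    simp only [List.head?_cons, Ne, Option.some.injEq]
    intro e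
    rcases h.1 with h' | h'
    · simp at h'
    · rw [e] at h'; simp at h'

theorem pvNpc_extract : ∀ (q r : List Char), pvNoColonPair (q ++ ':' :: r) = true →
    pvNoColonPair r = true ∧ r.head? ≠ some ':' := by
  intro q
  induction q with
  | nil =>
    intro r h
    exact ⟨pvNpc_tail _ _ h, pvNpc_head _ h⟩
  | cons a q ih =>
    intro r h
    exact ih r (pvNpc_tail _ _ h)

theorem pvDecomp (l : List Char) : (':' ∉ l) ∨ ∃ q r, l = q ++ ':' :: r ∧ ':' ∉ q := by
  induction l with
  | nil => left; simp
  | cons c l ih =>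
    by_cases hc : c = ':'
    · right; exact ⟨[], l, by rw [hc]; rfl, by simp⟩
    · rcases ih with h | ⟨q, r, rfl, hq⟩
      · left
        intro hm
        rcases List.mem_cons.mp hm with e | e
        · exact hc e.symm
        · exact h e
      · right
        refine ⟨c :: q, r, rfl, ?_⟩
        intro hm
        rcases List.mem_cons.mp hm with e | e
        · exact hc e.symm
        · exact hq e

theorem pvLoopR_skip (q : List Char) : ∀ (r : List Char) (parts : List (List Char)) (seg : List Char),
    ':' ∉ q → parts.length ≠ 2 → loopR (q ++ r) parts seg = loopR r parts (seg ++ q) := by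
  induction q with
  | nil => intro r parts seg _ _; simp
  | cons c q ih =>
    intro r parts seg h h2
    have hc : ¬(c = ':') := by
      intro e; exact h (by rw [e]; exact List.mem_cons_self)
    have hq : ':' ∉ q := fun e => h (List.mem_cons_of_mem _ e)
    simp only [List.cons_append, loopR, if_neg h2, if_neg hc]
    rw [ih r parts (seg ++ [c]) hq h2]
    simp

theorem pvLoopR_colon (r : List Char) (parts : List (List Char)) (seg : List Char)
    (h : seg ≠ []) (h2 : parts.length ≠ 2) :
    loopR (':' :: r) parts seg = loopR r (parts ++ [seg]) [] := by
  simp [loopR, h, h2]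

theorem pvLoopR_tail : ∀ (r : List Char) (parts : List (List Char)) (seg : List Char),
    3 ≤ parts.length → pvNoColonPair r = true → (seg = [] → r.head? ≠ some ':') →
    ∃ ps tl, loopR r parts seg = some (parts ++ ps, tl) := by
  intro r
  induction r with
  | nil => exact fun parts seg _ _ _ => ⟨[], seg, by simp [loopR]⟩
  | cons c r ih =>
    intro parts seg h3 hnp hseg
    have h2 : parts.length ≠ 2 := by omega
    by_cases hc : c = ':'
    · subst hc
      have hsne : seg ≠ [] := by
        intro e
        exact (hseg e) (by simp)
      rw [pvLoopR_colon r parts seg hsne h2]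
      obtain ⟨ps, tl, hh⟩ := ih (parts ++ [seg]) [] (by simp; omega) (pvNpc_tail _ _ hnp)
        (fun _ => pvNpc_head r hnp)
      exact ⟨[seg] ++ ps, tl, by rw [hh]; simp⟩
    · have hstep : loopR (c :: r) parts seg = loopR r parts (seg ++ [c]) := by
        simp [loopR, hc, h2]
      rw [hstep]
      exact ih parts (seg ++ [c]) h3 (pvNpc_tail _ _ hnp) (by intro e; simp at e)

theorem pvSp2 {q : List Char} (h : ':' ∉ q) : q.splitOn ':' = [q] := by
  induction q with
  | nil => rfl
  | cons a q ih =>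
    rw [List.mem_cons] at h
    push_neg at h
    have ha : ¬(a = ':') := fun e => h.1 e.symm
    simp [List.splitOn, List.splitOnP_cons, ha] at *
    simp [ih h.2]

theorem pvSp1 {q : List Char} (r : List Char) (h : ':' ∉ q) :
    (q ++ ':' :: r).splitOn ':' = q :: r.splitOn ':' := by
  induction q with
  | nil => simp [List.splitOn, List.splitOnP_cons]
  | cons a q ih =>
    rw [List.mem_cons] at h
    push_neg at h
    have ha : ¬(a = ':') := fun e => h.1 e.symm
    simp only [List.cons_append, List.splitOn, List.splitOnP_cons] at *
    simp [ih h.2, ha]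

theorem pvSpne (l : List Char) : l.splitOn ':' ≠ [] := by
  rw [List.splitOn]
  exact List.splitOnP_ne_nil _ l

theorem pvSp4 (n : Nat) : ∀ (r : List Char), r.length ≤ n → pvNoColonPair r = true →
    r.head? ≠ some ':' → [] ∉ (r.splitOn ':').dropLast := by
  induction n with
  | zero =>
    intro r hl _ _
    have : r = [] := by cases r with | nil => rfl | cons a s => simp at hl
    subst this
    simp [List.splitOn_nil]
  | succ n ih =>
    intro r hl h1 h2
    rcases pvDecomp r with hc | ⟨q, s, rfl, hq⟩
    · rw [pvSp2 hc]; simp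
    · have hqne : q ≠ [] := by
        intro e; subst e; simp at h2
      obtain ⟨h1', h2'⟩ := pvNpc_extract q s h1
      rw [pvSp1 s hq]
      have hlen : s.length ≤ n := by
        cases q with
        | nil => exact absurd rfl hqne
        | cons a q' => simp only [List.cons_append, List.length_cons, List.length_append] at hl; omega
      have hrec := ih s hlen h1' h2'
      rw [List.dropLast_cons_of_ne_nil (pvSpne s)]
      intro hm
      rcases List.mem_cons.mp hm with e | e
      · exact hqne e.symm
      · exact hrec e

-- B's body on a plain character list (definitionally equal to the port)
def pvBcore (l : List Char) : List (String × String) :=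
  let pieces := l.splitOn ':'
  if l = [] ∨ [] ∈ pieces.dropLast then []
  else
    [("filepath", String.ofList (pieces.getD 0 [])),
     ("filetype", if 1 < pieces.length then String.ofList (pieces.getD 1 []) else ""),
     ("matrix_spec", if 2 < pieces.length then String.ofList (([':'] : List Char).intercalate (pieces.drop 2)) else "")]

theorem pvB_eq (txt : String) : split_fetch_spec_py_alt txt = pvBcore txt.toList := rfl

theorem pvOfl_nil : String.ofList ([] : List Char) = "" := rfl

theorem pvCore (l : List Char) (hne : l ≠ []) (hhead : l.head? ≠ some ':')
    (hnp : pvNoColonPair l = true) : pvFin (loopR l [] []) = pvBcore l := by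
  rcases pvDecomp l with hc | ⟨q0, r1, rfl, hq0⟩
  · -- no colon at all
    have h1 : loopR l [] [] = some ([], l) := by
      have := pvLoopR_skip l [] [] [] hc (by simp)
      simpa using this
    have hlp : 0 < l.length := List.length_pos_of_ne_nil hne
    rw [h1]
    simp [pvFin, pvBcore, pvSp2 hc, hne, hlp, pvOfl_nil]
  · have hq0ne : q0 ≠ [] := by
      intro e; subst e; simp at hhead
    obtain ⟨hnp1, hh1⟩ := pvNpc_extract q0 r1 hnp
    have step1 : loopR (q0 ++ ':' :: r1) [] [] = loopR r1 [q0] [] := by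
      have h1 := pvLoopR_skip q0 (':' :: r1) [] [] hq0 (by simp)
      simp only [List.nil_append] at h1
      rw [h1, pvLoopR_colon r1 [] q0 hq0ne (by simp)]
      rfl
    rw [step1]
    rcases pvDecomp r1 with hc1 | ⟨q1, r2, rfl, hq1⟩
    · -- exactly one colon
      have h1 : loopR r1 [q0] [] = some ([q0], r1) := by
        have := pvLoopR_skip r1 [] [q0] [] hc1 (by simp)
        simpa using this
      have hsp : List.splitOn ':' (q0 ++ ':' :: r1) = [q0, r1] := by
        rw [pvSp1 r1 hq0, pvSp2 hc1]
      rw [h1]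
      by_cases hr1 : r1 = []
      · subst hr1
        simp [pvFin, pvBcore, hsp, hq0ne, pvOfl_nil]
      · have hlp : 0 < r1.length := List.length_pos_of_ne_nil hr1
        simp [pvFin, pvBcore, hsp, hq0ne, hr1, hlp, pvOfl_nil]
    · -- at least two colons
      have hq1ne : q1 ≠ [] := by
        intro e; subst e; simp at hh1
      obtain ⟨hnp2, hh2⟩ := pvNpc_extract q1 r2 hnp1
      have step2 : loopR (q1 ++ ':' :: r2) [q0] [] = loopR r2 [q0, q1] [] := by
        have h1 := pvLoopR_skip q1 (':' :: r2) [q0] [] hq1 (by simp)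
        simp only [List.nil_append] at h1
        rw [h1, pvLoopR_colon r2 [q0] q1 hq1ne (by simp)]
        rfl
      rw [step2]
      have hsp : List.splitOn ':' (q0 ++ ':' :: (q1 ++ ':' :: r2)) =
          q0 :: q1 :: List.splitOn ':' r2 := by
        rw [pvSp1 _ hq0, pvSp1 _ hq1]
      cases r2 with
      | nil =>
        rw [List.splitOn_nil] at hsp
        simp [loopR, pvFin, pvBcore, hsp, hq0ne, hq1ne, List.intercalate, pvOfl_nil]
      | cons c r2' =>
        have hcne : c ≠ ':' := by
          intro e; rw [e] at hh2; simp at hh2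
        have step3 : loopR (c :: r2') [q0, q1] [] = loopR r2' [q0, q1, c :: r2'] [c] := by
          simp [loopR, hcne]
        rw [step3]
        obtain ⟨ps, tl, heq⟩ := pvLoopR_tail r2' [q0, q1, c :: r2'] [c] (by simp)
          (pvNpc_tail _ _ hnp2) (by intro e; simp at e)
        rw [heq]
        -- A's side: final parts start with [q0, q1, c :: r2']
        have hA : pvFin (some ([q0, q1, c :: r2'] ++ ps, tl)) =
            [("filepath", String.ofList q0), ("filetype", String.ofList q1),
             ("matrix_spec", String.ofList (c :: r2'))] := by
          unfold pvFin
          obtain ⟨ps2, hps2⟩ : ∃ ps2,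
              (if 0 < tl.length then ([q0, q1, c :: r2'] ++ ps) ++ [tl] else [q0, q1, c :: r2'] ++ ps) =
              [q0, q1, c :: r2'] ++ ps2 := by
            by_cases h : 0 < tl.length
            · exact ⟨ps ++ [tl], by simp [h]⟩
            · exact ⟨ps, by simp [h]⟩
          simp only [hps2]
          have hlen : 3 ≤ ([q0, q1, c :: r2'] ++ ps2).length := by simp
          rw [if_neg (by omega : ¬ ([q0, q1, c :: r2'] ++ ps2).length = 0)]
          rw [if_pos (by omega), if_pos (by omega)]
          rw [List.getD_append _ _ _ 0 (by simp), List.getD_append _ _ _ 1 (by simp),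
            List.getD_append _ _ _ 2 (by simp)]
          rfl
        rw [hA]
        -- B's side
        have hps3 := pvSpne (c :: r2')
        have hguard : ¬(q0 ++ ':' :: (q1 ++ ':' :: (c :: r2')) = [] ∨
            [] ∈ (q0 :: q1 :: (c :: r2').splitOn ':').dropLast) := by
          push_neg
          refine ⟨by simp, ?_⟩
          rw [List.dropLast_cons_of_ne_nil (by simp), List.dropLast_cons_of_ne_nil hps3]
          intro hm
          rcases List.mem_cons.mp hm with e | hm'
          · exact hq0ne e.symm
          rcases List.mem_cons.mp hm' with e | hm''
          · exact hq1ne e.symm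
          · exact pvSp4 (c :: r2').length (c :: r2') (le_refl _) hnp2 hh2 hm''
        unfold pvBcore
        simp only [hsp]
        rw [if_neg hguard]
        have hplen : 2 < (q0 :: q1 :: (c :: r2').splitOn ':').length := by
          simp only [List.length_cons]
          have : (c :: r2').splitOn ':' ≠ [] := hps3
          cases h : (c :: r2').splitOn ':' with
          | nil => exact absurd h this
          | cons x xs => simp
        rw [if_pos (by omega), if_pos hplen]
        have hint : ([':'] : List Char).intercalate ((q0 :: q1 :: (c :: r2').splitOn ':').drop 2) =
            c :: r2' := by
          simp only [List.drop]
          exact List.intercalate_splitOn (c :: r2') ':'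
        rw [hint]
        rfl

-- ===== VERDICT (by name: the statement is the Claim_ definition above) =====
theorem split_fetch_spec_py_spec : Claim_equal_split_fetch_spec_py := by
  intro txt _ hpre
  obtain ⟨hne, hhead, hnp⟩ := hpre
  unfold Spec_split_fetch_spec_py
  rw [pvA_eq, pvB_eq]
  exact pvCore txt.toList hne hhead hnp
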